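-- pv_equiv track=rewrite | github.com/AU-DIS/scalable-kmeans | python/kmeans_eco.py | get_square_squared_sums
-- ===== SOURCE A (Python) =====
-- import math
--
-- def get_square_squared_sums(data):
--     d_sqrt = int(math.sqrt(len(data[0])))
--     log_d_sqrt = int(math.log(d_sqrt, 2))
--
--     res = [[0 for _ in range(log_d_sqrt + 1)] for _ in range(len(data))]
--
--     for i in range(len(data)):
--         res[i][0] = (data[i][0] ** 2)
--         for level in range(1, log_d_sqrt+1):
--             if level > 0: res[i][level] += res[i][level-1]
--             two_p_level_m1 = int(2**(level-1))
--             two_p_level = int(2**level)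
--             for l in range(two_p_level_m1):
--                 res[i][level] += sum([folan**2 for folan in data[i][(d_sqrt*(two_p_level_m1 + l)): (d_sqrt*(two_p_level_m1 + l)) + two_p_level]])
--                 res[i][level] += sum([folan**2 for folan in data[i][l*d_sqrt + two_p_level_m1: l*d_sqrt + two_p_level]])
--     return res
-- ===== SOURCE B (Python) =====
-- import math
--
-- def get_square_squared_sums(data):
--     d = int(math.sqrt(len(data[0])))
--     levels = int(math.log(d, 2))
--     res = []
--     for row in data:
--         out = []
--         for lv in range(levels + 1):
--             side = 2 ** lv
--             out.append(sum(x * x for r in range(side) for x in row[r * d: r * d + side]))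
--         res.append(out)
--     return res
-- ===== Notes on version B (the rewrite author's own statement) =====
-- stated objective: alternative
-- what changed: Replaces A's incremental scheme (carry the previous level forward and add L-shaped boundary slices) by a direct region characterisation: each level is computed independently as the squared-sum of the top-left 2^level x 2^level square of the row viewed as a d x d matrix, with no accumulation across levels or per-level deltas.
import Mathlib
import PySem

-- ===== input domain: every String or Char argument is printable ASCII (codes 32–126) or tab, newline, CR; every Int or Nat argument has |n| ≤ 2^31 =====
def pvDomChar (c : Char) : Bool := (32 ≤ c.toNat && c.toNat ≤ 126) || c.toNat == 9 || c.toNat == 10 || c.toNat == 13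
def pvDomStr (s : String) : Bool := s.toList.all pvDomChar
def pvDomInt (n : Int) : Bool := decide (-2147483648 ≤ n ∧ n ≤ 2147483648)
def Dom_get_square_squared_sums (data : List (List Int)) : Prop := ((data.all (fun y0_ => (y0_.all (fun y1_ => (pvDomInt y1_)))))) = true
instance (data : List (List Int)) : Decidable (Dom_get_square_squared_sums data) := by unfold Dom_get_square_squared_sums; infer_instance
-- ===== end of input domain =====

-- B replaces A's fused accumulate-while-summing L-shaped updates by a direct region
-- characterisation: each level independently sums the squares of the top-left
-- 2^level x 2^level square of the row viewed as a d x d matrix; objective: alternative.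


-- ===== PORT A =====
-- sum([folan**2 for folan in xs])
def pvSqSumA (xs : List Int) : Int := (xs.map (fun folan => folan ^ 2)).sum

-- the body of A's `for level in ...` loop (state = the row res[i] being mutated in place)
def pvStepA (row : List Int) (d_sqrt : Nat) (res : List Int) (level : Int) : List Int :=
  let t : Nat := level.toNat
  let res := if level > 0 then res.set t (res.getD t 0 + res.getD (t - 1) 0) else res
  let two_p_level_m1 : Nat := 2 ^ (level - 1).toNat
  let two_p_level : Nat := 2 ^ level.toNat
  (PySem.List.pyRange 0 (two_p_level_m1 : Int) 1).foldl (fun r l =>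
    let r := r.set t (r.getD t 0 + pvSqSumA (PySem.List.slice row
        (some ((d_sqrt : Int) * ((two_p_level_m1 : Int) + l)))
        (some ((d_sqrt : Int) * ((two_p_level_m1 : Int) + l) + (two_p_level : Int)))))
    r.set t (r.getD t 0 + pvSqSumA (PySem.List.slice row
        (some (l * (d_sqrt : Int) + (two_p_level_m1 : Int)))
        (some (l * (d_sqrt : Int) + (two_p_level : Int)))))) res

-- int(math.sqrt(len(data[0]))) ported as Nat.sqrt, int(math.log(d_sqrt, 2)) as Nat.log2
-- (exact for the machine-representable lengths reachable here);
-- data[i][0] is read with pyGetD (default 0): Python raises there, excluded by Pre_.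
def get_square_squared_sums (data : List (List Int)) : List (List Int) :=
  let d_sqrt : Nat := Nat.sqrt (data.headD []).length
  let log_d_sqrt : Nat := Nat.log2 d_sqrt
  data.map (fun row =>
    let res0 : List Int := (List.replicate (log_d_sqrt + 1) (0 : Int)).set 0 ((PySem.List.pyGetD row 0 0) ^ 2)
    (PySem.List.pyRange 1 ((log_d_sqrt : Int) + 1) 1).foldl (pvStepA row d_sqrt) res0)

-- ===== PORT B =====
-- sum(x * x for ... for x in slice): squares accumulated left to right
def pvSqSumB (xs : List Int) : Int := xs.foldl (fun s x => s + x * x) 0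

-- B: out[lv] = sum of squares over rows r < 2^lv of the slice row[r*d : r*d + 2^lv]
-- (the top-left 2^lv x 2^lv square of the d x d matrix); no accumulation across levels.
def get_square_squared_sums_alt (data : List (List Int)) : List (List Int) :=
  let d : Nat := Nat.sqrt (data.headD []).length
  let levels : Nat := Nat.log2 d
  data.map (fun row =>
    (PySem.List.pyRange 0 ((levels : Int) + 1) 1).map (fun lv =>
      (PySem.List.pyRange 0 ((2 : Int) ^ lv.toNat) 1).foldl (fun s r =>
        s + pvSqSumB (PySem.List.slice row
              (some (r * (d : Int)))
              (some (r * (d : Int) + (2 : Int) ^ lv.toNat)))) 0))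

-- ===== PRECONDITION & SPEC =====
-- Pre_ excludes exactly the inputs on which A raises: empty data (IndexError on data[0]),
-- an empty first row (math.log(0, 2) -> ValueError) and any empty row (IndexError on data[i][0]).
def Pre_get_square_squared_sums (data : List (List Int)) : Prop :=
  data ≠ [] ∧ ∀ row ∈ data, row ≠ []
instance (data : List (List Int)) : Decidable (Pre_get_square_squared_sums data) := by
  unfold Pre_get_square_squared_sums; infer_instance
def pvWitness_get_square_squared_sums : List (List Int) := [[1, 2, 3, 4]]

def Spec_get_square_squared_sums (data : List (List Int)) (out : List (List Int)) : Prop := out = get_square_squared_sums_alt data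
instance (data : List (List Int)) (out : List (List Int)) : Decidable (Spec_get_square_squared_sums data out) := by unfold Spec_get_square_squared_sums; infer_instance

-- ===== CLAIM (what is proved, stated in full; the proofs are below) =====
def Claim_equal_get_square_squared_sums : Prop := ∀ (data : List (List Int)), Dom_get_square_squared_sums data → Pre_get_square_squared_sums data → Spec_get_square_squared_sums data (get_square_squared_sums data)

-- ===== LEMMAS AND PROOFS =====

-- A's per-level raw contribution, in drop/take form
def pvDelta (row : List Int) (d h : Nat) : Int :=
  ((List.range h).map (fun l =>
      pvSqSumA ((row.drop (d * (h + l))).take (2 * h)) +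
      pvSqSumA ((row.drop (l * d + h)).take h))).sum

-- the running per-level prefix sums of A, as a recursion over the level
def pvP (row : List Int) (d : Nat) : Nat → Int
  | 0 => (PySem.List.pyGetD row 0 0) ^ 2
  | k + 1 => pvP row d k + pvDelta row d (2 ^ k)

-- B's level value: squared-sum over the top-left h x h square
def pvSq (row : List Int) (d h : Nat) : Int :=
  ((List.range h).map (fun r => pvSqSumA ((row.drop (r * d)).take h))).sum

theorem pvSqSum_eq (xs : List Int) : pvSqSumB xs = pvSqSumA xs := by
  suffices h : ∀ (xs : List Int) (acc : Int), xs.foldl (fun s x => s + x * x) acc = acc + (xs.map (fun folan => folan ^ 2)).sum by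
    simpa [pvSqSumA, pvSqSumB] using h xs 0
  intro xs
  induction xs with
  | nil => intro acc; simp
  | cons a t ih => intro acc; simp [ih]; ring

theorem pvSqSumA_append (xs ys : List Int) : pvSqSumA (xs ++ ys) = pvSqSumA xs + pvSqSumA ys := by
  simp [pvSqSumA]

-- a Python slice with natural bounds, as drop/take
theorem pv_slice_nat (row : List Int) (a b : Int) (j n : Nat)
    (ha : a = (j : Int)) (hb : b = (j : Int) + (n : Int)) :
    PySem.List.slice row (some a) (some b) = (row.drop j).take n := by
  subst ha; subst hb; exact PySem.List.slice_natCast_add row j n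

-- reading / writing the distinguished middle cell
theorem pv_getD_mid (pfx zs : List Int) (w : Int) (t : Nat) (h : t = pfx.length) :
    (pfx ++ w :: zs).getD t 0 = w := by
  subst h; simp [List.getD_eq_getElem?_getD]

theorem pv_getD_mid1 (pfx zs : List Int) (a w : Int) (t : Nat) (h : t = pfx.length + 1) :
    (pfx ++ a :: w :: zs).getD t 0 = w := by
  have := pv_getD_mid (pfx ++ [a]) zs w t (by simpa using h)
  simpa using this

theorem pv_set_mid (pfx zs : List Int) (w v : Int) (t : Nat) (h : t = pfx.length) :
    (pfx ++ w :: zs).set t v = pfx ++ v :: zs := by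
  subst h; simp

theorem pv_set_mid1 (pfx zs : List Int) (a w v : Int) (t : Nat) (h : t = pfx.length + 1) :
    (pfx ++ a :: w :: zs).set t v = pfx ++ a :: v :: zs := by
  have := pv_set_mid (pfx ++ [a]) zs w v t (by simpa using h)
  simpa using this

-- A's inner l-loop only accumulates into the middle cell
theorem pv_innerA (t2 : Nat) (pfx zs : List Int) (w : Int)
    (f g : Int → Int) (ls : List Int) (ht : t2 = pfx.length) :
    ls.foldl (fun r l =>
      (r.set t2 (r.getD t2 0 + f l)).set t2
        ((r.set t2 (r.getD t2 0 + f l)).getD t2 0 + g l)) (pfx ++ w :: zs)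
    = pfx ++ (ls.foldl (fun s l => s + f l + g l) w) :: zs := by
  induction ls generalizing w with
  | nil => simp
  | cons a t ih =>
    simp only [List.foldl_cons]
    rw [pv_getD_mid pfx zs w t2 ht, pv_set_mid pfx zs w _ t2 ht,
        pv_getD_mid pfx zs _ t2 ht, pv_set_mid pfx zs _ _ t2 ht, ih]

-- shifting the start value out of a sum-accumulating fold
theorem pv_fold2_shift (f g : Int → Int) (ls : List Int) (w : Int) :
    ls.foldl (fun s l => s + f l + g l) w = w + ls.foldl (fun s l => s + f l + g l) 0 := by
  induction ls generalizing w with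
  | nil => simp
  | cons a t ih =>
    simp only [List.foldl_cons]
    rw [ih, ih (0 + f a + g a)]
    ring

-- A's inner loop total equals pvDelta (slices converted to drop/take)
theorem pv_fold_to_delta (row : List Int) (d k : Nat) :
    (PySem.List.pyRange 0 ((2 ^ k : Nat) : Int) 1).foldl (fun s l =>
      s + pvSqSumA (PySem.List.slice row
            (some ((d : Int) * (((2 ^ k : Nat) : Int) + l)))
            (some ((d : Int) * (((2 ^ k : Nat) : Int) + l) + ((2 ^ (k + 1) : Nat) : Int))))
        + pvSqSumA (PySem.List.slice row
            (some (l * (d : Int) + ((2 ^ k : Nat) : Int)))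
            (some (l * (d : Int) + ((2 ^ (k + 1) : Nat) : Int))))) 0
    = pvDelta row d (2 ^ k) := by
  have hfun : (fun (s : Int) (l : Int) =>
      s + pvSqSumA (PySem.List.slice row
            (some ((d : Int) * (((2 ^ k : Nat) : Int) + l)))
            (some ((d : Int) * (((2 ^ k : Nat) : Int) + l) + ((2 ^ (k + 1) : Nat) : Int))))
        + pvSqSumA (PySem.List.slice row
            (some (l * (d : Int) + ((2 ^ k : Nat) : Int)))
            (some (l * (d : Int) + ((2 ^ (k + 1) : Nat) : Int)))))
      = (fun (s : Int) (l : Int) => s +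
          (pvSqSumA (PySem.List.slice row
            (some ((d : Int) * (((2 ^ k : Nat) : Int) + l)))
            (some ((d : Int) * (((2 ^ k : Nat) : Int) + l) + ((2 ^ (k + 1) : Nat) : Int))))
          + pvSqSumA (PySem.List.slice row
            (some (l * (d : Int) + ((2 ^ k : Nat) : Int)))
            (some (l * (d : Int) + ((2 ^ (k + 1) : Nat) : Int)))))) := by
    funext s l; ring
  rw [hfun, PySem.List.foldl_add, PySem.List.pyRange_one, List.map_map]
  simp only [Int.sub_zero, Int.toNat_natCast]
  unfold pvDelta
  rw [zero_add]
  congr 1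
  apply List.map_congr_left
  intro l _
  simp only [Function.comp]
  rw [pv_slice_nat row _ _ (d * (2 ^ k + l)) (2 * 2 ^ k) (by push_cast; ring)
        (by push_cast [pow_succ]; ring),
      pv_slice_nat row _ _ (l * d + 2 ^ k) (2 ^ k) (by push_cast; ring)
        (by push_cast [pow_succ]; ring)]

-- one level step of A, on a state of the invariant shape
theorem pv_stepA (row : List Int) (d k : Nat) (zs : List Int) :
    pvStepA row d (((List.range (k + 1)).map (pvP row d)) ++ 0 :: zs) ((k : Int) + 1)
    = ((List.range (k + 2)).map (pvP row d)) ++ zs := by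
  have hc1 : ((k : Int) + 1).toNat = k + 1 := by omega
  have hc2 : (((k : Int) + 1) - 1).toNat = k := by omega
  have hpos : ((k : Int) + 1) > 0 := by positivity
  simp only [pvStepA, hc1, hc2, if_pos hpos]
  have hsplit : List.map (pvP row d) (List.range (k + 1)) ++ 0 :: zs
      = List.map (pvP row d) (List.range k) ++ pvP row d k :: 0 :: zs := by
    rw [List.range_succ]; simp
  rw [hsplit, Nat.add_sub_cancel,
    pv_getD_mid1 (List.map (pvP row d) (List.range k)) zs (pvP row d k) 0 (k + 1) (by simp),
    pv_getD_mid (List.map (pvP row d) (List.range k)) (0 :: zs) (pvP row d k) k (by simp),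
    pv_set_mid1 (List.map (pvP row d) (List.range k)) zs (pvP row d k) 0 (0 + pvP row d k) (k + 1) (by simp)]
  have hassoc : List.map (pvP row d) (List.range k) ++ pvP row d k :: (0 + pvP row d k) :: zs
      = (List.map (pvP row d) (List.range k) ++ [pvP row d k]) ++ (0 + pvP row d k) :: zs := by
    simp
  rw [hassoc,
    pv_innerA (k + 1) (List.map (pvP row d) (List.range k) ++ [pvP row d k]) zs (0 + pvP row d k)
      (fun l => pvSqSumA (PySem.List.slice row
        (some ((d : Int) * (((2 ^ k : Nat) : Int) + l)))
        (some ((d : Int) * (((2 ^ k : Nat) : Int) + l) + ((2 ^ (k + 1) : Nat) : Int)))))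
      (fun l => pvSqSumA (PySem.List.slice row
        (some (l * (d : Int) + ((2 ^ k : Nat) : Int)))
        (some (l * (d : Int) + ((2 ^ (k + 1) : Nat) : Int)))))
      (PySem.List.pyRange 0 ((2 ^ k : Nat) : Int) 1) (by simp),
    pv_fold2_shift, pv_fold_to_delta row d k]
  simp [List.range_succ, pvP, List.append_assoc]

-- A's whole level loop, by the invariant
theorem pv_rowA (row : List Int) (d L : Nat) : ∀ k, k ≤ L →
    (PySem.List.pyRange 1 ((k : Int) + 1) 1).foldl (pvStepA row d)
      ((List.replicate (L + 1) (0 : Int)).set 0 ((PySem.List.pyGetD row 0 0) ^ 2))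
    = (List.range (k + 1)).map (pvP row d) ++ List.replicate (L - k) 0 := by
  intro k
  induction k with
  | zero =>
    intro _
    simp [PySem.List.pyRange_one_eq_nil, List.replicate_succ, pvP]
  | succ k ih =>
    intro hk
    have hb : ((k + 1 : Nat) : Int) + 1 = ((k : Int) + 1) + 1 := by push_cast; ring
    rw [hb, PySem.List.pyRange_one_succ_right (by omega : (1 : Int) ≤ (k : Int) + 1),
      List.foldl_append, ih (by omega), List.foldl_cons, List.foldl_nil,
      show L - k = (L - (k + 1)) + 1 by omega, List.replicate_succ, pv_stepA]

-- B's row equals the list of square-region sums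
theorem pv_rowB (row : List Int) (d L : Nat) :
    (PySem.List.pyRange 0 ((L : Int) + 1) 1).map (fun lv =>
      (PySem.List.pyRange 0 ((2 : Int) ^ lv.toNat) 1).foldl (fun s r =>
        s + pvSqSumB (PySem.List.slice row
              (some (r * (d : Int)))
              (some (r * (d : Int) + (2 : Int) ^ lv.toNat)))) 0)
    = (List.range (L + 1)).map (fun k => pvSq row d (2 ^ k)) := by
  rw [PySem.List.pyRange_one, List.map_map]
  have hlen : (((L : Int) + 1) - 0).toNat = L + 1 := by omega
  rw [hlen]
  apply List.map_congr_left
  intro k _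
  simp only [Function.comp, zero_add, Int.toNat_natCast]
  have h2 : ((2 : Int) ^ k) = ((2 ^ k : Nat) : Int) := by push_cast; ring
  rw [h2]
  rw [PySem.List.foldl_add, PySem.List.pyRange_one, List.map_map]
  simp only [Int.sub_zero, Int.toNat_natCast]
  unfold pvSq
  rw [zero_add]
  congr 1
  apply List.map_congr_left
  intro r _
  simp only [Function.comp]
  rw [pv_slice_nat row _ _ (r * d) (2 ^ k) (by push_cast; ring) (by push_cast; ring),
      pvSqSum_eq]

-- base: the 1 x 1 square is data[i][0] ** 2
theorem pv_sq_base (row : List Int) (d : Nat) :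
    pvSq row d 1 = (PySem.List.pyGetD row 0 0) ^ 2 := by
  cases row with
  | nil => simp [pvSq, pvSqSumA, PySem.List.pyGetD, PySem.List.pyGet?]
  | cons x t =>
    simp [pvSq, pvSqSumA, List.range_succ, PySem.List.pyGetD, PySem.List.pyGet?, PySem.List.pyIdx?]

-- doubling the square adds exactly A's L-shaped delta
theorem pv_sq_double (row : List Int) (d h : Nat) :
    pvSq row d (2 * h) = pvSq row d h + pvDelta row d h := by
  unfold pvSq pvDelta
  simp only [two_mul]
  rw [List.range_add, List.map_append, List.sum_append, List.map_map]
  have hfst : (List.range h).map (fun r => pvSqSumA ((row.drop (r * d)).take (h + h)))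
      = (List.range h).map (fun r =>
          pvSqSumA ((row.drop (r * d)).take h) + pvSqSumA ((row.drop (r * d + h)).take h)) := by
    apply List.map_congr_left
    intro r _
    rw [List.take_add, pvSqSumA_append, List.drop_drop]
  rw [hfst]
  have hsum : ∀ (f g : Nat → Int) (ls : List Nat),
      (ls.map (fun x => f x + g x)).sum = (ls.map f).sum + (ls.map g).sum := by
    intro f g ls
    induction ls with
    | nil => simp
    | cons a t ih => simp [ih]; ring
  rw [hsum (fun r => pvSqSumA ((row.drop (r * d)).take h))
        (fun r => pvSqSumA ((row.drop (r * d + h)).take h)),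
      hsum (fun l => pvSqSumA ((row.drop (d * (h + l))).take (h + h)))
        (fun l => pvSqSumA ((row.drop (l * d + h)).take h))]
  have hsnd : (List.range h).map ((fun r => pvSqSumA ((row.drop (r * d)).take (h + h))) ∘ (fun x => h + x))
      = (List.range h).map (fun l => pvSqSumA ((row.drop (d * (h + l))).take (h + h))) := by
    apply List.map_congr_left
    intro l _
    simp only [Function.comp]
    rw [Nat.mul_comm (h + l) d]
  rw [hsnd]
  ring

-- A's prefix value at level k IS the 2^k x 2^k square sum
theorem pv_P_eq_sq (row : List Int) (d : Nat) : ∀ k, pvP row d k = pvSq row d (2 ^ k) := by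
  intro k
  induction k with
  | zero => simp [pvP, pv_sq_base]
  | succ k ih =>
    rw [pow_succ, Nat.mul_comm, pv_sq_double, ← ih]
    rfl

-- ===== VERDICT (by name: the statement is the Claim_ definition above) =====
theorem get_square_squared_sums_spec : Claim_equal_get_square_squared_sums := by
  intro data _ _
  unfold Spec_get_square_squared_sums
  simp only [get_square_squared_sums, get_square_squared_sums_alt]
  apply List.map_congr_left
  intro row _
  rw [pv_rowA row (Nat.sqrt (data.headD []).length)
        (Nat.log2 (Nat.sqrt (data.headD []).length))
        (Nat.log2 (Nat.sqrt (data.headD []).length)) (le_refl _),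
      pv_rowB]
  simp only [Nat.sub_self, List.replicate_zero, List.append_nil]
  apply List.map_congr_left
  intro k _
  exact pv_P_eq_sq row _ k
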